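-- pv_equiv track=rewrite | github.com/AMIVAYUN/codeTestPrac | Programmers/Python/110 옮기기.py | getstr0
-- ===== SOURCE A (Python) =====
-- def getstr0( str0 ):
--     proc = [];
--     case = '110';
--     Mn = str0;
--     leng = len( str0 )
--     for i in range( 0, leng - 2 ):
--
--         if( str0[ i : i + 3 ] == case ):
--             proc.append( i );
--
--     for idx in proc:
--         temp = str0[ :idx ] + str0[ idx + 3: ];
--         temp = getstr0( temp );
--         for i in range( len( temp ) + 1 ):
--             temp2 = temp[ :i ] + case + temp[ i: ]
--             Mn = min( Mn, temp2 );
--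
--
--     return  Mn;
-- ===== SOURCE B (Python) =====
-- def getstr0(str0):
--     # Nothing to move if there is no '110' factor at all.
--     if str0.find('110') == -1:
--         return str0
--     # Remove every '110' factor with a stack, counting removals, then insert the
--     # removed '110's back one at a time, each at the lexicographically best position.
--     st = []
--     k = 0
--     for c in str0:
--         st.append(c)
--         if st[-3:] == ['1', '1', '0']:
--             del st[-3:]
--             k += 1
--     best = ''.join(st)
--     for _ in range(k):
--         best = min(best[:i] + '110' + best[i:] for i in range(len(best) + 1))
--     return best
-- ===== Notes on version B (the rewrite author's own statement) =====
-- stated objective: faster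
-- what changed: A explores an exponential remove-recurse-reinsert search over every '110' occurrence; B answers immediately when no '110' occurs, otherwise removes all '110' factors in one linear stack pass and reinserts each removed '110' greedily at the lexicographically best position.
import Mathlib
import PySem

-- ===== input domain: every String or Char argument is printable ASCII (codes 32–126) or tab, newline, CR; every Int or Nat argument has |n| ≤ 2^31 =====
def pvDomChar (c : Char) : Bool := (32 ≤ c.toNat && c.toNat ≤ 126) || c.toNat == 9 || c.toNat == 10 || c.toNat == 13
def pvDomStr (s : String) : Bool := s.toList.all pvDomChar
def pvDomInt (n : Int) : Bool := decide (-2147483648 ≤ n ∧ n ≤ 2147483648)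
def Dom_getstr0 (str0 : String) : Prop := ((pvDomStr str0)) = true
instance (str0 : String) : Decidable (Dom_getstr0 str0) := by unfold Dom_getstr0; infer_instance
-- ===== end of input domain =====

-- B replaces A's exponential remove-recurse-reinsert search by one linear stack pass removing
-- every '110' factor followed by k greedy best-position reinsertions (objective: faster).


-- ===== PORT A =====
-- A on the character list, with a fuel counter as a pure totality guard (each recursive call
-- removes 3 characters, so fuel = length is always sufficient; the fuel branch is never the
-- result on any actual input).  For each collected index of a '110' occurrence: delete it,
-- recurse, and try re-inserting '110' at every position, keeping the minimum.
def getstr0F : Nat → List Char → List Char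
  | 0, s => s
  | fuel + 1, s =>
    let leng : Int := s.length
    let proc : List Int := (PySem.List.pyRange 0 (leng - 2) 1).filter
        (fun i => PySem.List.slice s (some i) (some (i + 3)) = ['1', '1', '0'])
    proc.foldl
      (fun Mn idx =>
        let temp := PySem.List.slice s none (some idx) ++ PySem.List.slice s (some (idx + 3)) none
        let temp := getstr0F fuel temp
        (PySem.List.pyRange 0 ((temp.length : Int) + 1) 1).foldl
          (fun Mn i =>
            let temp2 := PySem.List.slice temp none (some i) ++ ['1', '1', '0'] ++
              PySem.List.slice temp (some i) none
            min Mn temp2) Mn)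
      s

-- ===== PORT B =====
-- one step of Source B's stack loop: push c, and if the stack now ends with '110', delete it and count
def stackStep (p : List Char × Nat) (c : Char) : List Char × Nat :=
  let st := p.1 ++ [c]
  if PySem.List.slice st (some (-3)) none = ['1', '1', '0'] then
    (PySem.List.slice st none (some (-3)), p.2 + 1)
  else (st, p.2)

-- Source B's min(best[:i] + '110' + best[i:] for i in range(len(best)+1))
def bestIns (best : List Char) : List Char :=
  let cands := (PySem.List.pyRange 0 ((best.length : Int) + 1) 1).map
      (fun i => PySem.List.slice best none (some i) ++ ['1', '1', '0'] ++
        PySem.List.slice best (some i) none)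
  (PySem.List.min? cands (fun x => x)).getD best

def getstr0_altL (s : List Char) : List Char :=
  if PySem.Chars.find s ['1', '1', '0'] = -1 then s
  else
    let p := s.foldl stackStep ([], 0)
    (List.range p.2).foldl (fun best _ => bestIns best) p.1

def getstr0 (str0 : String) : String :=
  String.ofList (getstr0F str0.toList.length str0.toList)

def getstr0_alt (str0 : String) : String := String.ofList (getstr0_altL str0.toList)

-- ===== PRECONDITION & SPEC =====
def Spec_getstr0 (str0 : String) (out : String) : Prop := out = getstr0_alt str0
instance (str0 : String) (out : String) : Decidable (Spec_getstr0 str0 out) := by unfold Spec_getstr0; infer_instance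

-- ===== CLAIM (what is proved, stated in full; the proofs are below) =====
def Claim_equal_getstr0 : Prop := ∀ (str0 : String), Dom_getstr0 str0 → Spec_getstr0 str0 (getstr0 str0)

-- ===== LEMMAS AND PROOFS =====

-- the '110' factor as a character list
def c110 : List Char := ['1', '1', '0']

-- insertion of '110' at position i, and the candidate list of all insertions
def insAt (b : List Char) (i : Nat) : List Char := b.take i ++ c110 ++ b.drop i

def candsL (b : List Char) : List (List Char) := (List.range (b.length + 1)).map (insAt b)

-- the stack pass of B
def kf (s : List Char) : List Char × Nat := s.foldl stackStep ([], 0)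

-- the reinsertion loop of B
def iterIns (r : List Char) (k : Nat) : List Char :=
  (List.range k).foldl (fun best _ => bestIns best) r

def OccL (s : List Char) : Prop := ∃ u w, s = u ++ c110 ++ w

-- ---- order helpers ----
lemma le_append_left (p x y : List Char) (h : x ≤ y) : p ++ x ≤ p ++ y := by
  rcases lt_or_eq_of_le h with h | h
  · exact le_of_lt (List.append_left_lt h)
  · simp [h]

lemma cons_le_cons_iff' (a b : Char) (x y : List Char) :
    (a :: x : List Char) ≤ b :: y ↔ a < b ∨ a = b ∧ x ≤ y := by
  rw [le_iff_lt_or_eq, List.cons_lt_cons_iff, le_iff_lt_or_eq]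
  constructor
  · rintro ((h | ⟨rfl, h⟩) | h) <;> simp_all
  · rintro (h | ⟨rfl, (h | rfl)⟩) <;> simp_all

lemma foldl_min_min (l : List (List Char)) : ∀ a b : List Char,
    l.foldl min (min a b) = min a (l.foldl min b) := by
  induction l with
  | nil => intro a b; rfl
  | cons c t ih =>
    intro a b
    simp only [List.foldl_cons, min_assoc, ih]

-- ---- bestIns characterization ----
lemma pyCands_eq (b : List Char) :
    (PySem.List.pyRange 0 ((b.length : Int) + 1) 1).map
      (fun i => PySem.List.slice b none (some i) ++ ['1', '1', '0'] ++
        PySem.List.slice b (some i) none) = candsL b := by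
  rw [PySem.List.pyRange_one, List.map_map]
  have hn : (((b.length : Int) + 1) - 0).toNat = b.length + 1 := by omega
  rw [hn]
  unfold candsL
  apply List.map_congr_left
  intro k _
  simp only [Function.comp, zero_add, PySem.List.slice_to_natCast, PySem.List.slice_from_natCast,
    insAt, c110]

lemma min?_conv (xs : List (List Char)) (key : List Char → List Char) :
    PySem.List.min? xs key =
      @PySem.List.min? _ _ _ (@LinearOrder.toDecidableLT _ List.instLinearOrder) xs key := by
  congr 1

lemma candsL_ne_nil (b : List Char) : candsL b ≠ [] := by
  simp [candsL, List.range_succ]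

lemma bestIns_min?_core (b : List Char) :
    PySem.List.min? (candsL b) (fun x => x) = some (bestIns b) := by
  unfold bestIns
  rw [pyCands_eq]
  cases h : PySem.List.min? (candsL b) (fun x => x) with
  | none => exact absurd ((PySem.List.min?_eq_none_iff _ _).mp h) (candsL_ne_nil b)
  | some m => simp [h]

lemma bestIns_min? (b : List Char) :
    @PySem.List.min? _ _ _ (@LinearOrder.toDecidableLT _ List.instLinearOrder)
      (candsL b) (fun x => x) = some (bestIns b) := by
  rw [← min?_conv]
  exact bestIns_min?_core b

lemma bestIns_mem (b : List Char) : bestIns b ∈ candsL b :=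
  PySem.List.min?_mem (bestIns_min?_core b)

lemma bestIns_le (b : List Char) (x : List Char) (hx : x ∈ candsL b) : bestIns b ≤ x :=
  PySem.List.min?_isMin (key := fun x => x) (bestIns_min? b) x hx

lemma candsL_cons (M : List Char) :
    candsL M = insAt M 0 :: ((List.range M.length).map Nat.succ).map (insAt M) := by
  unfold candsL
  rw [List.range_succ_eq_map, List.map_cons]

lemma bestIns_eq_fold (M : List Char) :
    bestIns M = (((List.range M.length).map Nat.succ).map (insAt M)).foldl min (insAt M 0) := by
  have h1 := bestIns_min? M
  rw [candsL_cons] at h1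
  rw [PySem.List.min?_id_cons] at h1
  exact (Option.some_injective _ h1).symm

lemma insAt_mem_candsL (b : List Char) (j : Nat) (hj : j ≤ b.length) :
    insAt b j ∈ candsL b := by
  simp only [candsL, List.mem_map]
  exact ⟨j, by simp [List.mem_range]; omega, rfl⟩

lemma length_insAt (b : List Char) (j : Nat) (hj : j ≤ b.length) :
    (insAt b j).length = b.length + 3 := by
  simp [insAt, c110]; omega

lemma length_bestIns (b : List Char) : (bestIns b).length = b.length + 3 := by
  have h := bestIns_mem b
  simp only [candsL, List.mem_map, List.mem_range] at h
  obtain ⟨j, hj, hje⟩ := h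
  rw [← hje, length_insAt b j (by omega)]

-- ---- A's inner loop computes min Mn (bestIns M) ----
lemma innerA (M Mn : List Char) :
    (PySem.List.pyRange 0 ((M.length : Int) + 1) 1).foldl
      (fun Mn i => min Mn (PySem.List.slice M none (some i) ++ ['1', '1', '0'] ++
        PySem.List.slice M (some i) none)) Mn = min Mn (bestIns M) := by
  rw [← List.foldl_map
    (f := fun i => PySem.List.slice M none (some i) ++ ['1', '1', '0'] ++
      PySem.List.slice M (some i) none) (g := min), pyCands_eq, candsL_cons,
    List.foldl_cons, foldl_min_min, ← bestIns_eq_fold]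

-- ---- stack pass lemmas ----
lemma stackStep_eq (st : List Char) (k : Nat) (c : Char) :
    stackStep (st, k) c =
      if (st ++ [c]).drop ((st ++ [c]).length - 3) = ['1', '1', '0'] then
        ((st ++ [c]).take ((st ++ [c]).length - 3), k + 1)
      else (st ++ [c], k) := by
  have h1 : PySem.List.slice (st ++ [c]) (some (-3)) none =
      List.drop ((st ++ [c]).length - 3) (st ++ [c]) :=
    PySem.List.slice_from_neg_ofNat _ 3 (by norm_num)
  have h2 : PySem.List.slice (st ++ [c]) none (some (-3)) =
      List.take ((st ++ [c]).length - 3) (st ++ [c]) :=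
    PySem.List.slice_to_neg_ofNat _ 3 (by norm_num)
  unfold stackStep
  simp only [h1, h2]

lemma drop_ne_c110_of_last1 (l : List Char) (m : Nat) (h : l.getLast? = some '1') :
    l.drop m ≠ ['1', '1', '0'] := by
  intro hd
  have h2 : l = l.take m ++ (['1', '1', '0'] : List Char) := by
    conv_lhs => rw [← List.take_append_drop m l]
    rw [hd]
  rw [h2] at h
  rw [show (['1','1','0'] : List Char) = ['1','1'] ++ ['0'] by rfl, ← List.append_assoc,
    List.getLast?_concat] at h
  simp at h

lemma stackStep_push1 (st : List Char) (k : Nat) :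
    stackStep (st, k) '1' = (st ++ ['1'], k) := by
  rw [stackStep_eq, if_neg]
  exact drop_ne_c110_of_last1 _ _ List.getLast?_concat

lemma fold110 (st : List Char) (k : Nat) :
    List.foldl stackStep (st, k) ['1', '1', '0'] = (st, k + 1) := by
  simp only [List.foldl_cons, List.foldl_nil, stackStep_push1]
  rw [List.append_assoc, stackStep_eq]
  have hl : ((st ++ (['1'] ++ ['1'])) ++ ['0']) = st ++ (['1', '1', '0'] : List Char) := by
    simp
  rw [hl]
  have hlen : (st ++ (['1', '1', '0'] : List Char)).length - 3 = st.length := by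
    simp
  rw [hlen, if_pos]
  · rw [List.take_left]
  · rw [List.drop_left]

lemma kshift : ∀ (v : List Char) (st : List Char) (k : Nat),
    v.foldl stackStep (st, k + 1) =
      ((v.foldl stackStep (st, k)).1, (v.foldl stackStep (st, k)).2 + 1) := by
  intro v
  induction v with
  | nil => intro st k; rfl
  | cons c v ih =>
    intro st k
    simp only [List.foldl_cons, stackStep_eq]
    split
    · exact ih _ _
    · exact ih _ _

lemma fold_insert110 (u v st : List Char) (k : Nat) :
    (u ++ (c110 ++ v)).foldl stackStep (st, k) =
      (((u ++ v).foldl stackStep (st, k)).1, ((u ++ v).foldl stackStep (st, k)).2 + 1) := by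
  rw [List.foldl_append, List.foldl_append, List.foldl_append (l' := v)]
  obtain ⟨stu, ku⟩ := u.foldl stackStep (st, k)
  rw [show (c110 : List Char) = ['1','1','0'] from rfl, fold110, kshift]

lemma fold_length : ∀ (v st : List Char) (k : Nat),
    ((v.foldl stackStep (st, k)).1).length + 3 * (v.foldl stackStep (st, k)).2 =
      st.length + 3 * k + v.length := by
  intro v
  induction v with
  | nil => intro st k; simp
  | cons c v ih =>
    intro st k
    simp only [List.foldl_cons, stackStep_eq]
    split
    · rename_i h
      have h3 := congrArg List.length h
      rw [List.length_drop] at h3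
      simp only [List.length_cons, List.length_nil, List.length_append] at h3
      rw [ih]
      simp only [List.length_take, List.length_append, List.length_cons, List.length_nil]
      rw [min_eq_left (Nat.sub_le _ _)]
      omega
    · rw [ih]; simp; omega

lemma fold_no_occ : ∀ (v st : List Char) (k : Nat),
    (¬ ∃ u w, st ++ v = u ++ c110 ++ w) → v.foldl stackStep (st, k) = (st ++ v, k) := by
  intro v
  induction v with
  | nil => intro st k _; simp
  | cons c v ih =>
    intro st k hno
    simp only [List.foldl_cons, stackStep_eq]
    rw [if_neg]
    · have := ih (st ++ [c]) k (by
        intro ⟨u, w, huw⟩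
        exact hno ⟨u, w, by rw [← huw, List.append_assoc]; rfl⟩)
      rw [this]; simp
    · intro h
      apply hno
      refine ⟨(st ++ [c]).take ((st ++ [c]).length - 3), v, ?_⟩
      conv_lhs => rw [show st ++ c :: v = (st ++ [c]) ++ v by simp,
        ← List.take_append_drop ((st ++ [c]).length - 3) (st ++ [c]), h]
      simp [c110]

lemma fold_k_mono : ∀ (v st : List Char) (k : Nat), k ≤ (v.foldl stackStep (st, k)).2 := by
  intro v
  induction v with
  | nil => intro st k; exact le_refl k
  | cons c v ih =>
    intro st k
    simp only [List.foldl_cons, stackStep_eq]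
    split
    · exact le_trans (Nat.le_succ k) (ih _ _)
    · exact ih _ _

lemma fold_no_pop : ∀ (v st : List Char) (k : Nat) (st' : List Char),
    v.foldl stackStep (st, k) = (st', k) → st' = st ++ v := by
  intro v
  induction v with
  | nil => intro st k st' h; simpa using (congrArg Prod.fst h).symm
  | cons c v ih =>
    intro st k st' h
    simp only [List.foldl_cons, stackStep_eq] at h
    split at h
    · exfalso
      have hm := fold_k_mono v ((st ++ [c]).take ((st ++ [c]).length - 3)) (k + 1)
      rw [h] at hm
      omega
    · rw [ih _ _ _ h]; simp

lemma kf_insert (s u w : List Char) (h : s = u ++ c110 ++ w) :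
    kf s = ((kf (u ++ w)).1, (kf (u ++ w)).2 + 1) := by
  unfold kf
  rw [h, List.append_assoc, fold_insert110]

lemma kf_no_occ (s : List Char) (h : ¬ OccL s) : kf s = (s, 0) := by
  unfold kf
  have := fold_no_occ s [] 0 (by simpa [OccL] using h)
  simpa using this

lemma altL_char (s : List Char) : getstr0_altL s = iterIns (kf s).1 (kf s).2 := by
  unfold getstr0_altL
  split
  · rename_i h
    rw [PySem.Chars.find_eq_neg_one_iff] at h
    have hno : ¬ OccL s := fun ⟨u, w, huw⟩ => h ⟨u, w, huw.symm⟩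
    rw [kf_no_occ s hno]
    simp [iterIns]
  · rfl

-- ---- reinsertion loop ----
lemma iterIns_succ (r : List Char) (k : Nat) :
    iterIns r (k + 1) = bestIns (iterIns r k) := by
  simp [iterIns, List.range_succ]

lemma iterIns_length (r : List Char) : ∀ k, (iterIns r k).length = r.length + 3 * k := by
  intro k
  induction k with
  | zero => simp [iterIns]
  | succ k ih => rw [iterIns_succ, length_bestIns, ih]; omega

-- insertion at a fixed position is monotone between strings of equal length
lemma insAt_cons (x : Char) (a : List Char) (j : Nat) :
    insAt (x :: a) (j + 1) = x :: insAt a j := by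
  simp [insAt, List.take_succ_cons, List.drop_succ_cons]

lemma insAt_mono : ∀ (j : Nat) (a b : List Char),
    a.length = b.length → a ≤ b → j ≤ b.length → insAt a j ≤ insAt b j := by
  intro j
  induction j with
  | zero =>
    intro a b _ hab _
    simp only [insAt, List.take_zero, List.drop_zero, List.nil_append]
    exact le_append_left c110 a b hab
  | succ j ih =>
    intro a b hlen hab hj
    cases b with
    | nil => simp at hj
    | cons y b' =>
      cases a with
      | nil => simp at hlen
      | cons x a' =>
        rw [insAt_cons, insAt_cons]
        rcases (cons_le_cons_iff' x y a' b').mp hab with h | ⟨rfl, h⟩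
        · exact le_of_lt (List.cons_lt_cons_iff.mpr (Or.inl h))
        · exact (cons_le_cons_iff' _ _ _ _).mpr
            (Or.inr ⟨rfl, ih a' b' (by simpa using hlen) h (by simpa using hj)⟩)

-- B's result is a lower bound for any string with the same stack pass
lemma iterIns_le : ∀ (k : Nat) (s r : List Char),
    s.foldl stackStep ([], 0) = (r, k) → iterIns r k ≤ s := by
  intro k
  induction k with
  | zero =>
    intro s r h
    have hs : r = s := by simpa using fold_no_pop s [] 0 r h
    simp [iterIns, hs]
  | succ k ih =>
    intro s r h
    have hkf : kf s = (r, k + 1) := h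
    have hocc : OccL s := by
      by_contra hno
      rw [kf_no_occ s hno] at hkf
      exact Nat.succ_ne_zero k (congrArg Prod.snd hkf).symm
    obtain ⟨u, w, huw⟩ := hocc
    have hins := kf_insert s u w huw
    rw [hkf] at hins
    have h1 : r = (kf (u ++ w)).1 := congrArg Prod.fst hins
    have h2 : (kf (u ++ w)).2 = k := by
      have := congrArg Prod.snd hins
      simpa using this.symm
    have ht : (u ++ w).foldl stackStep ([], 0) = (r, k) := by
      show kf (u ++ w) = (r, k)
      rw [Prod.ext_iff]
      exact ⟨h1.symm, h2⟩
    have hIH := ih (u ++ w) r ht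
    have hlenr : r.length + 3 * k = (u ++ w).length := by
      have hfl := fold_length (u ++ w) [] 0
      rw [ht] at hfl
      simpa using hfl
    have hlit : (iterIns r k).length = (u ++ w).length := by
      rw [iterIns_length]; omega
    have hu : u.length ≤ (iterIns r k).length := by
      rw [hlit]; simp
    calc iterIns r (k + 1) = bestIns (iterIns r k) := iterIns_succ r k
      _ ≤ insAt (iterIns r k) u.length := bestIns_le _ _ (insAt_mem_candsL _ _ hu)
      _ ≤ insAt (u ++ w) u.length := insAt_mono u.length _ _ hlit hIH (by simp)
      _ = u ++ c110 ++ w := by rw [insAt, List.take_left, List.drop_left, List.append_assoc]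
      _ = s := huw.symm

-- ---- occurrence/proc lemmas ----
lemma mem_proc_decomp (s : List Char) (i : Int)
    (h0 : 0 ≤ i) (hsl : PySem.List.slice s (some i) (some (i + 3)) = c110) :
    s = s.take i.toNat ++ c110 ++ s.drop (i.toNat + 3) := by
  rw [PySem.List.slice_toNat s h0 (by omega)] at hsl
  have h3 : (i + 3).toNat - i.toNat = 3 := by omega
  rw [h3] at hsl
  have hd : s.drop i.toNat = c110 ++ s.drop (i.toNat + 3) := by
    conv_lhs => rw [← List.take_append_drop 3 (s.drop i.toNat), hsl]
    rw [List.drop_drop, Nat.add_comm]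
  conv_lhs => rw [← List.take_append_drop i.toNat s, hd]
  rw [List.append_assoc]

lemma occ_mem_proc (s u w : List Char) (h : s = u ++ c110 ++ w) :
    ((u.length : Int)) ∈ (PySem.List.pyRange 0 ((s.length : Int) - 2) 1).filter
      (fun i => decide (PySem.List.slice s (some i) (some (i + 3)) = ['1', '1', '0'])) := by
  have hlen : s.length = u.length + 3 + w.length := by
    rw [h]; simp [c110]; omega
  rw [List.mem_filter]
  constructor
  · rw [PySem.List.mem_pyRange_one]
    constructor
    · positivity
    · omega
  · rw [decide_eq_true_iff]
    rw [PySem.List.slice_toNat s (by positivity) (by positivity)]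
    have h2 : (((u.length : Int)) + 3).toNat - ((u.length : Int)).toNat = 3 := by omega
    rw [h2]
    have h1 : ((u.length : Int)).toNat = u.length := by omega
    rw [h1, h, List.append_assoc, List.drop_left]
    simp [c110]

-- fold of a constant-min body over a nonempty list
lemma foldl_min_const' {ι : Type} (l : List ι) (g : List Char → ι → List Char)
    (X : List Char) (hg : ∀ Mn p, p ∈ l → g Mn p = min Mn X) :
    ∀ a, l.foldl g (min a X) = min a X := by
  induction l with
  | nil => intro a; rfl
  | cons p t ih =>
    intro a
    rw [List.foldl_cons, hg _ p List.mem_cons_self, min_assoc, min_self]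
    exact ih (fun Mn q hq => hg Mn q (List.mem_cons_of_mem p hq)) a

lemma foldl_min_const {ι : Type} (l : List ι) (g : List Char → ι → List Char)
    (X s : List Char) (hg : ∀ Mn p, p ∈ l → g Mn p = min Mn X) (hl : l ≠ []) :
    l.foldl g s = min s X := by
  cases l with
  | nil => exact absurd rfl hl
  | cons p t =>
    rw [List.foldl_cons, hg _ p List.mem_cons_self]
    exact foldl_min_const' t g X (fun Mn q hq => hg Mn q (List.mem_cons_of_mem p hq)) s

lemma main_step (n : Nat) (s : List Char) (hlen : s.length ≤ n + 1)
    (IH : ∀ t : List Char, t.length ≤ n → getstr0F n t = getstr0_altL t) :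
    getstr0F (n + 1) s = getstr0_altL s := by
  rw [getstr0F]
  dsimp only
  by_cases hP : (PySem.List.pyRange 0 ((s.length : Int) - 2) 1).filter
      (fun i => decide (PySem.List.slice s (some i) (some (i + 3)) = ['1', '1', '0'])) = []
  · rw [hP]
    simp only [List.foldl_nil]
    have hno : ¬ OccL s := by
      intro ⟨u, w, huw⟩
      have := occ_mem_proc s u w huw
      rw [hP] at this
      exact absurd this (List.not_mem_nil)
    rw [altL_char, kf_no_occ s hno]
    simp [iterIns]
  · refine Eq.trans (foldl_min_const _ _ (iterIns (kf s).1 (kf s).2) _ ?_ hP) ?_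
    · intro Mn i hi
      rw [List.mem_filter, PySem.List.mem_pyRange_one, decide_eq_true_iff] at hi
      obtain ⟨⟨h0, hup⟩, hsl⟩ := hi
      have hdec := mem_proc_decomp s i h0 hsl
      have htmp : PySem.List.slice s none (some i) ++ PySem.List.slice s (some (i + 3)) none =
          s.take i.toNat ++ s.drop (i.toNat + 3) := by
        rw [PySem.List.slice_to s h0, PySem.List.slice_from s (by omega)]
        congr 1
        congr 1
        omega
      rw [htmp]
      have hlt : (s.take i.toNat ++ s.drop (i.toNat + 3)).length ≤ n := by
        have := congrArg List.length hdec
        simp only [List.length_append, c110, List.length_cons, List.length_nil] at this ⊢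
        omega
      rw [IH _ hlt, altL_char]
      have hins := kf_insert s _ _ hdec
      rw [innerA, ← iterIns_succ, hins]
    · have hle : iterIns (kf s).1 (kf s).2 ≤ s := iterIns_le _ s _ rfl
      rw [min_eq_right hle, altL_char]

theorem getstr0F_eq_altL : ∀ (n : Nat) (s : List Char), s.length ≤ n →
    getstr0F n s = getstr0_altL s := by
  intro n
  induction n with
  | zero =>
    intro s hs
    have : s = [] := List.eq_nil_of_length_eq_zero (Nat.le_zero.mp hs)
    subst this
    rfl
  | succ n ih =>
    intro s hs
    exact main_step n s hs ih

-- ===== VERDICT (by name: the statement is the Claim_ definition above) =====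
theorem getstr0_spec : Claim_equal_getstr0 := by
  intro s _
  unfold Spec_getstr0 getstr0 getstr0_alt
  rw [getstr0F_eq_altL s.toList.length s.toList le_rfl]
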